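-- pv_equiv track=rewrite | github.com/vlaxcs/FMI-INFO-S15-2024-2027 | Anul I - Licenta/Semestrul I/Programarea Algoritmilor/Laboratoare/Laboratorul 10 - Recapitulare pentru test/Recapitulare - Subiectul II/01. Text/text.py | computeGroups
-- ===== SOURCE A (Python) =====
-- def computeGroups(referenceWord, words):
--     groups = {}
--     referenceLetters = set(referenceWord)
--
--     for word in words:
--          letters = set([letter for letter in word if letter.isalpha()])
--          if letters & referenceLetters == letters:
--              letters = "[{}]".format(",".join(sorted("'" + letter + "'" for letter in letters)))
--              if letters not in groups:
--                  groups[letters] = [word]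
--              else:
--                  groups[letters].append(word)
--
--     return dict(sorted(groups.items()))
-- ===== SOURCE B (Python) =====
-- def computeGroups(referenceWord, words):
--     ref = set(referenceWord)
--
--     def keyOf(word):
--         letters = {c for c in word if c.isalpha()}
--         if letters <= ref:
--             return "[" + ",".join("'" + c + "'" for c in sorted(letters)) + "]"
--         return None
--
--     ks = [keyOf(w) for w in words]
--     keys = sorted({k for k in ks if k is not None})
--     return {k: [w for w, kw in zip(words, ks) if kw == k] for k in keys}
-- ===== Notes on version B (the rewrite author's own statement) =====
-- stated objective: alternative
-- what changed: A accumulates groups into a dict keyed by the quoted-letters string and sorts the dict items at the end; B computes each word's optional group key, sorts the distinct keys, and builds the result directly in key order by filtering the word list per key (no dict accumulation).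
import Mathlib
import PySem

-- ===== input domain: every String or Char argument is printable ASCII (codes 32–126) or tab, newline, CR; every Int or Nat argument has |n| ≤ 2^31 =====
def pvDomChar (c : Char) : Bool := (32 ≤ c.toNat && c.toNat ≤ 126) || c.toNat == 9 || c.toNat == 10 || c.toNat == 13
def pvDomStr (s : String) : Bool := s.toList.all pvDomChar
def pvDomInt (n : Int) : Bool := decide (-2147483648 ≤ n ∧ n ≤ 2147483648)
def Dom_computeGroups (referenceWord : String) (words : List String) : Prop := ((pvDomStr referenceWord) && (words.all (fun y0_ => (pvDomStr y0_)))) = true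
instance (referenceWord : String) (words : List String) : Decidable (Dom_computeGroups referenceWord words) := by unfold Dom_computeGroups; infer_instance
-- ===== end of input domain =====

-- B replaces A's dict-accumulate-then-sort with sort-the-distinct-keys-then-filter-per-key
-- (a different decomposition with the same return value; objective: alternative, no speed claim).

-- ===== PORT A =====
-- helper: "[{}]".format(",".join(sorted("'" + letter + "'" for letter in letters)))
-- (iterating the set 'letters' is safe here: sorted() without a key makes the result order-independent)
def pvKeyA (letters : PySem.Set Char) : String :=
  String.ofList ('[' :: (PySem.Chars.join [','] (PySem.List.sorted (letters.map (fun letter => '\'' :: letter :: ['\''])) (fun x => x)) ++ [']']))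

def computeGroups (referenceWord : String) (words : List String) : List (String × List String) :=
  let referenceLetters : PySem.Set Char := PySem.Set.ofList referenceWord.toList
  let groups : PySem.Dict String (List String) :=
    words.foldl (fun groups word =>
      let letters : PySem.Set Char := PySem.Set.ofList (word.toList.filter (fun letter => PySem.Chars.isalpha letter))
      if PySem.Set.equal (PySem.Set.inter letters referenceLetters) letters then
        let key := pvKeyA letters
        if groups.contains key = false then groups.insert key [word]
        else groups.modify key [] (fun l => l ++ [word])
      else groups) PySem.Dict.empty
  PySem.List.sorted2 groups.items (fun p => p.1) (fun p => p.2)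

-- ===== PORT B =====
-- helper: keyOf(word) from Source B — the group key if the word's letters are a subset of ref, else None
def pvKeyOf? (ref : PySem.Set Char) (word : String) : Option String :=
  let letters : PySem.Set Char := PySem.Set.ofList (word.toList.filter (fun c => PySem.Chars.isalpha c))
  if letters.issubset ref then
    some (String.ofList ('[' :: (PySem.Chars.join [','] ((PySem.List.sorted letters (fun c => c)).map (fun c => '\'' :: c :: ['\''])) ++ [']'])))
  else none

def computeGroups_alt (referenceWord : String) (words : List String) : List (String × List String) :=
  let ref : PySem.Set Char := PySem.Set.ofList referenceWord.toList
  let ks : List (Option String) := words.map (fun w => pvKeyOf? ref w)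
  let keys := PySem.List.sorted (PySem.Set.ofList (ks.filterMap (fun k => k))) (fun k => k)
  keys.map (fun k => (k, ((words.zip ks).filter (fun p => p.2 == some k)).map (fun p => p.1)))

-- ===== PRECONDITION & SPEC =====
def Spec_computeGroups (referenceWord : String) (words : List String) (out : List (String × List String)) : Prop := out = computeGroups_alt referenceWord words
instance (referenceWord : String) (words : List String) (out : List (String × List String)) : Decidable (Spec_computeGroups referenceWord words out) := by unfold Spec_computeGroups; infer_instance

-- ===== CLAIM (what is proved, stated in full; the proofs are below) =====
def Claim_equal_computeGroups : Prop := ∀ (referenceWord : String) (words : List String), Dom_computeGroups referenceWord words → Spec_computeGroups referenceWord words (computeGroups referenceWord words)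

-- ===== LEMMAS AND PROOFS =====

-- A's subset test 'letters & ref == letters' equals B's 'letters <= ref'
lemma pv_equal_inter (l r : PySem.Set Char) :
    PySem.Set.equal (PySem.Set.inter l r) l = l.issubset r := by
  unfold PySem.Set.equal PySem.Set.inter PySem.Set.issubset PySem.Set.contains
  rw [Bool.eq_iff_iff]
  simp only [Bool.and_eq_true, List.all_eq_true, List.contains_iff_mem, List.mem_filter]
  constructor
  · rintro ⟨-, h2⟩ x hx
    exact ((h2 x hx).2)
  · intro h
    refine ⟨fun x hx => hx.1, fun x hx => ⟨hx, by simpa [List.contains_iff_mem] using h x hx⟩⟩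

-- sorting is insensitive to the (propositionally equal) order instance used
lemma pv_sorted_irrel {α κ : Type} (i1 i2 : LT κ) (d1 : @DecidableLT κ i1) (d2 : @DecidableLT κ i2)
    (h : ∀ a b : κ, @LT.lt κ i1 a b ↔ @LT.lt κ i2 a b) (xs : List α) (key : α → κ) :
    @PySem.List.sorted α κ i1 d1 xs key false = @PySem.List.sorted α κ i2 d2 xs key false := by
  rw [@PySem.List.sorted_eq_foldl_insertBy α κ i1 d1 xs key,
      @PySem.List.sorted_eq_foldl_insertBy α κ i2 d2 xs key]
  congr 1
  funext acc x
  congr 1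
  funext a b
  exact decide_eq_decide.mpr (h (key a) (key b))

-- quoting a character is strictly monotone for string (list) comparison
lemma pv_quote_lt (a b : Char) (h : a < b) :
    ('\'' :: a :: ['\'']) < ('\'' :: b :: ['\'']) :=
  List.Lex.cons (List.Lex.rel h)

-- sorting a duplicate-free list (identity key) is strictly increasing
lemma pv_sorted_nodup_pairwise_lt {α : Type} [LinearOrder α] (xs : List α) (h : xs.Nodup) :
    List.Pairwise (fun a b => a < b) (PySem.List.sorted xs (fun x => x)) := by
  have h1 := PySem.List.sorted_pairwise xs (fun x => x)
  have h2 : (PySem.List.sorted xs (fun x => x)).Nodup :=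
    ((PySem.List.sorted_perm xs (fun x => x) false).symm.nodup) h
  exact (h1.and h2).imp (fun hab => lt_of_le_of_ne hab.1 hab.2)

-- sorting the quoted letters (A) = quoting the sorted letters (B), letters distinct
lemma pv_sorted_quote (letters : List Char) (h : letters.Nodup) :
    PySem.List.sorted (letters.map (fun c => '\'' :: c :: ['\''])) (fun x => x)
      = (PySem.List.sorted letters (fun c => c)).map (fun c => '\'' :: c :: ['\'']) := by
  rw [pv_sorted_irrel List.instLT (inferInstance : LinearOrder (List Char)).toLT _
      (inferInstance : LinearOrder (List Char)).toDecidableLT (fun a b => Iff.rfl)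
      (letters.map (fun c => '\'' :: c :: ['\''])) (fun x => x)]
  exact PySem.List.sorted_eq_of_perm_of_pairwise_lt
    (letters.map (fun c => '\'' :: c :: ['\'']))
    ((PySem.List.sorted letters (fun c => c)).map (fun c => '\'' :: c :: ['\'']))
    (fun x => x)
    ((PySem.List.sorted_perm letters (fun c => c) false).map _)
    (List.Pairwise.map _ (fun a b hab => pv_quote_lt a b hab) (pv_sorted_nodup_pairwise_lt letters h))

-- insertBy only consults 'before x y' for y in the list
lemma pv_insertBy_congr {α : Type} (b1 b2 : α → α → Bool) (x : α) :
    ∀ (ys : List α), (∀ y ∈ ys, b1 x y = b2 x y) →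
      PySem.List.insertBy b1 x ys = PySem.List.insertBy b2 x ys
  | [], _ => rfl
  | y :: ys, h => by
    simp only [PySem.List.insertBy, h y (by simp)]
    split
    · rfl
    · simp only [List.cons.injEq, true_and]
      exact pv_insertBy_congr b1 b2 x ys (fun z hz => h z (by simp [hz]))

lemma pv_foldl_insertBy_congr {α : Type} (b1 b2 : α → α → Bool) (S : List α)
    (h : ∀ a ∈ S, ∀ c ∈ S, b1 a c = b2 a c) :
    ∀ (xs acc : List α), (∀ a ∈ xs, a ∈ S) → (∀ a ∈ acc, a ∈ S) →
      xs.foldl (fun acc x => PySem.List.insertBy b1 x acc) acc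
        = xs.foldl (fun acc x => PySem.List.insertBy b2 x acc) acc
  | [], acc, _, _ => rfl
  | x :: xs, acc, hxs, hacc => by
    simp only [List.foldl_cons]
    have hx : x ∈ S := hxs x (by simp)
    have hcong : PySem.List.insertBy b1 x acc = PySem.List.insertBy b2 x acc :=
      pv_insertBy_congr b1 b2 x acc (fun y hy => h x hx y (hacc y hy))
    rw [hcong]
    exact pv_foldl_insertBy_congr b1 b2 S h xs _ (fun a ha => hxs a (by simp [ha]))
      (fun a ha => by
        rcases (PySem.List.mem_insertBy b2 x a acc).mp ha with rfl | ha
        · exact hx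
        · exact hacc a ha)

-- the main sorting fact: A's sort of the (key, group) pairs over distinct keys
-- = B's map over the sorted keys
lemma pv_sorted2_map (S : List String) (hnd : S.Nodup) (f : String → List String) :
    PySem.List.sorted2 (S.map (fun k => (k, f k))) (fun p => p.1) (fun p => p.2)
      = (PySem.List.sorted S (fun k => k)).map (fun k => (k, f k)) := by
  have hmem : ∀ a ∈ S.map (fun k => (k, f k)), a = (a.1, f a.1) := by
    intro a ha
    rcases List.mem_map.mp ha with ⟨k, hk, rfl⟩
    rfl
  have step1 : PySem.List.sorted2 (S.map (fun k => (k, f k))) (fun p => p.1) (fun p => p.2)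
      = PySem.List.sorted (S.map (fun k => (k, f k))) (fun p => p.1) := by
    show List.foldl (fun acc x => PySem.List.insertBy _ x acc) [] _ = _
    rw [PySem.List.sorted_eq_foldl_insertBy]
    apply pv_foldl_insertBy_congr _ _ (S.map (fun k => (k, f k)))
      ?_ _ _ (fun a ha => ha) (fun a ha => by simp at ha)
    intro a ha c hc
    rcases lt_trichotomy a.1 c.1 with h | h | h
    · simp [h, asymm h]
    · have : a = c := by rw [hmem a ha, hmem c hc, h]
      subst this
      simp
    · simp [h, asymm h]
  rw [step1]
  exact PySem.List.sorted_eq_of_perm_of_pairwise_lt _ _ _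
    ((PySem.List.sorted_perm S (fun k => k) false).map _)
    (List.Pairwise.map _ (fun a b hab => hab) (pv_sorted_nodup_pairwise_lt S hnd))

-- filterMap of a guarded some = map over the filtered list
lemma pv_filterMap_if {α β : Type} (p : α → Bool) (g : α → β) (l : List α) :
    l.filterMap (fun x => if p x then some (g x) else none) = (l.filter p).map g := by
  induction l with
  | nil => rfl
  | cons x xs ih =>
    cases hp : p x <;> simp [hp, ih]

-- A's per-word grouping loop, characterized: items of the accumulated dict
-- = the distinct keys in first-appearance order, each with its words in original order
lemma pv_groups_items (p : String → Bool) (key : String → String) (words : List String) :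
    (List.foldl (fun groups word =>
        if p word = true then
          if groups.contains (key word) = false then groups.insert (key word) [word]
          else groups.modify (key word) [] (fun l => l ++ [word])
        else groups) PySem.Dict.empty words).items
    = (PySem.Set.ofList ((words.filter p).map key)).map
        (fun k => (k, (words.filter p).filter (fun w => key w == k))) := by
  have hcollapse : ∀ (d : PySem.Dict String (List String)) (w : String),
      (if d.contains (key w) = false then d.insert (key w) [w]
       else d.modify (key w) [] (fun l => l ++ [w])) = d.modify (key w) [] (fun l => l ++ [w]) := by
    intro d w
    cases hc : d.contains (key w)
    · unfold PySem.Dict.modify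
      rw [PySem.Dict.getD_of_not_contains _ _ hc]
      simp
    · simp
  have hfun : (fun (groups : PySem.Dict String (List String)) word =>
        if p word = true then
          if groups.contains (key word) = false then groups.insert (key word) [word]
          else groups.modify (key word) [] (fun l => l ++ [word])
        else groups)
      = (fun groups word => if p word = true then groups.modify (key word) [] (fun l => l ++ [word]) else groups) := by
    funext d w
    by_cases hp : p w = true
    · simp only [if_pos hp, hcollapse]
    · simp only [if_neg hp]
  rw [hfun, PySem.List.foldl_if_eq_foldl_filter]
  have hnd : ((words.filter p).foldl (fun d w => d.modify (key w) [] (fun l => l ++ [w])) PySem.Dict.empty).keys.Nodup := by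
    apply PySem.Dict.nodup_keys_foldl_modify_key
    simp [PySem.Dict.keys_empty]
  have hkeys : ((words.filter p).foldl (fun d w => d.modify (key w) [] (fun l => l ++ [w])) PySem.Dict.empty).keys
      = PySem.Set.ofList ((words.filter p).map key) := by
    rw [PySem.Dict.keys_foldl_modify_key (words.filter p) key [] (fun d w v => v ++ [w]) PySem.Dict.empty]
    rfl
  have hgetD : ∀ k, ((words.filter p).foldl (fun d w => d.modify (key w) [] (fun l => l ++ [w])) PySem.Dict.empty).getD k []
      = (words.filter p).filter (fun w => key w == k) := by
    intro k
    rw [show (words.filter p).foldl (fun d w => d.modify (key w) [] (fun l => l ++ [w])) PySem.Dict.empty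
        = ((words.filter p).map (fun w => (key w, w))).foldl (fun d q => d.modify q.1 [] (fun l => l ++ [q.2])) PySem.Dict.empty
      from (List.foldl_map (f := fun w => (key w, w)) (g := fun d q => d.modify q.1 [] (fun l => l ++ [q.2])) (l := words.filter p) (init := PySem.Dict.empty)).symm]
    rw [PySem.Dict.getD_foldl_modify_append]
    simp [List.filter_map, List.map_map, Function.comp_def, PySem.Dict.getD_empty]
  rw [PySem.Dict.items_eq_map_keys _ hnd [], hkeys]
  exact List.map_congr_left (fun k _ => by rw [hgetD k])

-- B's keyOf expressed through A's subset test and A's key builder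
lemma pv_keyOf_eq (ref : PySem.Set Char) (w : String) :
    pvKeyOf? ref w =
      if ((PySem.Set.ofList (List.filter (fun letter => PySem.Chars.isalpha letter) w.toList)).inter ref).equal
          (PySem.Set.ofList (List.filter (fun letter => PySem.Chars.isalpha letter) w.toList)) = true
      then some (pvKeyA (PySem.Set.ofList (List.filter (fun letter => PySem.Chars.isalpha letter) w.toList)))
      else none := by
  unfold pvKeyOf? pvKeyA
  dsimp only
  rw [pv_equal_inter, pv_sorted_quote _ (PySem.Set.nodup_ofList _)]

-- precomputed keys: filtering the zipped (word, key) list = filtering the words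
lemma pv_zip_filter (f : String → Option String) (k : String) (words : List String) :
    ((words.zip (words.map f)).filter (fun p => p.2 == some k)).map (fun p => p.1)
      = words.filter (fun w => f w == some k) := by
  induction words with
  | nil => rfl
  | cons x xs ih =>
    cases hx : f x == some k <;> simp [hx, ih]

lemma pv_filterMap_id_map (f : String → Option String) (l : List String) :
    (l.map f).filterMap (fun k => k) = l.filterMap f := by
  simp [List.filterMap_map]

lemma pv_filter_key (p : String → Bool) (g : String → String) (k : String) (words : List String) :
    words.filter (fun w => (if p w = true then some (g w) else none) == some k)
      = (words.filter p).filter (fun w => g w == k) := by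
  induction words with
  | nil => rfl
  | cons x xs ih =>
    cases hp : p x <;> simp [List.filter_cons, hp, ih]

-- ===== VERDICT (by name: the statement is the Claim_ definition above) =====
theorem computeGroups_spec : Claim_equal_computeGroups := by
  intro referenceWord words _dom
  show computeGroups referenceWord words = computeGroups_alt referenceWord words
  unfold computeGroups computeGroups_alt
  dsimp only
  simp only [pv_keyOf_eq]
  rw [pv_groups_items
      (fun word => ((PySem.Set.ofList (List.filter (fun letter => PySem.Chars.isalpha letter) word.toList)).inter
          (PySem.Set.ofList referenceWord.toList)).equal
          (PySem.Set.ofList (List.filter (fun letter => PySem.Chars.isalpha letter) word.toList)))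
      (fun word => pvKeyA (PySem.Set.ofList (List.filter (fun letter => PySem.Chars.isalpha letter) word.toList)))
      words]
  simp only [pv_zip_filter, pv_filterMap_id_map, pv_filterMap_if, pv_filter_key]
  exact pv_sorted2_map _ (PySem.Set.nodup_ofList _) _
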